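-- pv_equiv track=rewrite | github.com/urielulloa/tweet-analysis | preprocesstweet.py | split_tweet
-- ===== SOURCE A (Python) =====
-- def split_tweet(corpus):
--     prev = 0
--     count = 0
--     tweets = []
--     for index, char in enumerate(corpus):
--         if count is 0:
--             if char is "\t":
--                 username = corpus[prev:index]
--                 prev = index+1
--                 count = 1
--
--             elif char is "\n":
--                 count = 0
--                 prev = index+1
--
--         elif count is 1:
--             if char is "\t":
--                 time = corpus[prev:index]
--                 prev = index+1
--                 count = 2
--             elif char is "\n":
--                 count = 0
--                 prev = index+1
--
--         elif count is 2:
--             if char is "\n":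
--                 message = corpus[prev:index]
--                 prev = index+1
--                 count = 0
--                 tweets.append([username, time, message])
--             elif char is "\t":
--                 count = 0
--                 prev = index+1
--
--     return tweets
-- ===== SOURCE B (Python) =====
-- def split_tweet(corpus):
--     tweets = []
--     for line in corpus.split('\n')[:-1]:
--         parts = line.split('\t')
--         if len(parts) == 3:
--             tweets.append(parts)
--     return tweets
-- ===== Notes on version B (the rewrite author's own statement) =====
-- stated objective: simpler
-- what changed: Replaced the char-by-char 0/1/2 counter state machine (with stale username/time variables and manual slice bookkeeping) by split-based parsing: split on newlines, drop the trailing unterminated segment, and keep exactly the lines with three tab-separated fields. (the str.split loops run in C instead of a Python-level per-character loop)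
-- intended difference: On inputs containing a newline-terminated line whose tab count is congruent to 2 mod 3 but is not 2 (e.g. 5 or 8 tabs), A's counter reset makes it emit the last three fields of that malformed line, while B skips it; skipping a line that does not consist of exactly the three fields username/time/message is the intended behaviour. — e.g. on split_tweet("a\tb\tc\td\te\tf\n"): A returns [["d", "e", "f"]], B returns []
import Mathlib
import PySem

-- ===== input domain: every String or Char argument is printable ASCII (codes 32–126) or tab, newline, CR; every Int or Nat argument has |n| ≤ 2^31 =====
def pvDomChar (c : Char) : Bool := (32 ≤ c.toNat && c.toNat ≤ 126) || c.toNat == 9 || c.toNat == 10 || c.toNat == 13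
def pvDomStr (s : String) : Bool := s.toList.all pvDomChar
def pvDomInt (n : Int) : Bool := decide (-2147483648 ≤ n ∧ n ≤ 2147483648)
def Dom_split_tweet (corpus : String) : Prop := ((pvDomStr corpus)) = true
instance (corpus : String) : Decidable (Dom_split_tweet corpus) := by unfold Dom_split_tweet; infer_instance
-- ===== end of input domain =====

-- B replaces A's char-by-char 0/1/2-counter state machine by newline/tab splitting, keeping exactly the
-- three-field lines (objective: simpler); on malformed lines with 5, 8, … tabs the two differ (see D_ below).

-- ===== PORT A =====
-- loop body of A's for-loop; state = (prev, count, username, time, tweets); string ops on List Char via PySem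
def pvStepA (cs : List Char) (st : Int × Int × List Char × List Char × List (List String))
    (p : Int × Char) : Int × Int × List Char × List Char × List (List String) :=
  match st, p with
  | (prev, count, username, time, tweets), (index, char) =>
    if count == 0 then
      if char == '\t' then (index + 1, 1, PySem.List.slice cs (some prev) (some index), time, tweets)
      else if char == '\n' then (index + 1, 0, username, time, tweets)
      else (prev, count, username, time, tweets)
    else if count == 1 then
      if char == '\t' then (index + 1, 2, username, PySem.List.slice cs (some prev) (some index), tweets)
      else if char == '\n' then (index + 1, 0, username, time, tweets)
      else (prev, count, username, time, tweets)
    else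
      if char == '\n' then
        (index + 1, 0, username, time,
          tweets ++ [[String.ofList username, String.ofList time, String.ofList (PySem.List.slice cs (some prev) (some index))]])
      else if char == '\t' then (index + 1, 0, username, time, tweets)
      else (prev, count, username, time, tweets)

def split_tweet (corpus : String) : List (List String) :=
  ((PySem.List.enumerate corpus.toList 0).foldl (pvStepA corpus.toList) (0, 0, [], [], [])).2.2.2.2

-- ===== PORT B =====
-- loop body of B's for-loop over lines
def pvStepB (tweets : List (List String)) (line : List Char) : List (List String) :=
  let parts := PySem.Chars.splitOn line "\t".toList
  if parts.length == 3 then tweets ++ [parts.map String.ofList]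
  else tweets

def split_tweet_alt (corpus : String) : List (List String) :=
  (PySem.List.slice (PySem.Chars.splitOn corpus.toList "\n".toList) none (some (-1))).foldl pvStepB []

-- ===== PRECONDITION & SPEC =====
-- On inputs with a newline-terminated line whose tab count is ≡ 2 (mod 3) but not 2 (5, 8, … tabs), A's
-- counter reset emits the last three fields of that malformed line, while B skips it; skipping a line that
-- is not exactly username/time/message is the intended behaviour.
def D_split_tweet (corpus : String) : Prop :=
  ∃ line ∈ (PySem.Chars.splitOn corpus.toList ['\n']).dropLast,
    line.count '\t' % 3 = 2 ∧ line.count '\t' ≠ 2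
instance (corpus : String) : Decidable (D_split_tweet corpus) := by unfold D_split_tweet; infer_instance

def Spec_split_tweet (corpus : String) (out : List (List String)) : Prop :=
  ¬ D_split_tweet corpus → out = split_tweet_alt corpus
instance (corpus : String) (out : List (List String)) : Decidable (Spec_split_tweet corpus out) := by unfold Spec_split_tweet; infer_instance

def pvDiffWitness_split_tweet : String := "a\tb\tc\td\te\tf\n"
def pvDiffWitnessOut_split_tweet : (List (List String)) × (List (List String)) :=
  ([["d", "e", "f"]], [])

-- ===== CLAIM (what is proved, stated in full; the proofs are below) =====
def Claim_unchanged_split_tweet : Prop := ∀ (corpus : String), Dom_split_tweet corpus → Spec_split_tweet corpus (split_tweet corpus)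
def Claim_changed_split_tweet : Prop := Dom_split_tweet (pvDiffWitness_split_tweet) ∧ D_split_tweet (pvDiffWitness_split_tweet) ∧ split_tweet (pvDiffWitness_split_tweet) = pvDiffWitnessOut_split_tweet.1 ∧ split_tweet_alt (pvDiffWitness_split_tweet) = pvDiffWitnessOut_split_tweet.2 ∧ pvDiffWitnessOut_split_tweet.1 ≠ pvDiffWitnessOut_split_tweet.2
def Claim_exact_split_tweet : Prop := ∀ (corpus : String), Dom_split_tweet corpus → D_split_tweet corpus → split_tweet corpus ≠ split_tweet_alt corpus

-- ===== LEMMAS AND PROOFS =====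

-- A's per-line behaviour, re-expressed: emit the last three tab-fields of a line iff (tabs + 1) % 3 = 0
def pvStepOld (tweets : List (List String)) (line : List Char) : List (List String) :=
  let parts := PySem.Chars.splitOn line "\t".toList
  if parts.length % 3 == 0 then tweets ++ [(PySem.List.slice parts (some (-3)) none).map String.ofList]
  else tweets

-- structural split on one separator character, left to right (proved equal to PySem.Chars.splitOn below)
def pvLines (d : Char) : List Char → List (List Char)
  | [] => [[]]
  | c :: rest => if c = d then [] :: pvLines d rest else (pvLines d rest).modifyHead (c :: ·)

-- join of acc ++ [cur] with separator d
def pvJoinA (d : Char) : List (List Char) → List Char → List Char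
  | [], cur => cur
  | x :: rest, cur => x ++ d :: pvJoinA d rest cur

-- the last three fields, as strings
def pvEmit (segs : List (List Char)) : List String := (segs.drop (segs.length - 3)).map String.ofList

-- common spec machine: acc = completed tab-fields of the current line, cur = pending field
def pvM : List Char → List (List Char) → List Char → List (List String) → List (List String)
  | [], _, _, tw => tw
  | c :: rest, acc, cur, tw =>
    if c = '\t' then pvM rest (acc ++ [cur]) [] tw
    else if c = '\n' then
      pvM rest [] [] (if (acc.length + 1) % 3 == 0 then tw ++ [pvEmit (acc ++ [cur])] else tw)
    else pvM rest acc (cur ++ [c]) tw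

theorem pvLines_ne_nil (d : Char) (l : List Char) : pvLines d l ≠ [] := by
  induction l with
  | nil => simp [pvLines]
  | cons c rest ih =>
    simp only [pvLines]
    split
    · simp
    · rcases h : pvLines d rest with _ | ⟨x, xs⟩
      · exact absurd h ih
      · simp [List.modifyHead]

theorem pvLines_no_sep (d : Char) (l : List Char) (h : d ∉ l) : pvLines d l = [l] := by
  induction l with
  | nil => rfl
  | cons c rest ih =>
    simp only [List.mem_cons, not_or] at h
    simp [pvLines, Ne.symm h.1, ih h.2, List.modifyHead]

theorem pvLines_break (d : Char) (p rest : List Char) (h : d ∉ p) :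
    pvLines d (p ++ d :: rest) = p :: pvLines d rest := by
  induction p with
  | nil => simp [pvLines]
  | cons c pr ih =>
    simp only [List.mem_cons, not_or] at h
    simp [pvLines, Ne.symm h.1, ih h.2, List.modifyHead]

theorem pvLines_length (d : Char) (l : List Char) : (pvLines d l).length = l.count d + 1 := by
  induction l with
  | nil => simp [pvLines]
  | cons c rest ih =>
    simp only [pvLines]
    by_cases h : c = d
    · subst h; simp [List.count_cons, ih]
    · rcases hr : pvLines d rest with _ | ⟨x, xs⟩
      · exact absurd hr (pvLines_ne_nil d rest)
      · simp only [if_neg h, hr, List.modifyHead]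
        have := ih
        rw [hr] at this
        simp only [List.length_cons] at this ⊢
        rw [List.count_cons]
        simp [h, this]

theorem pv_go_eq (d : Char) (fuel : Nat) (l cur : List Char) (acc : List (List Char))
    (h : l.length ≤ fuel) :
    PySem.Chars.splitOn.go [d] fuel l cur acc
      = acc.reverse ++ (pvLines d l).modifyHead (cur.reverse ++ ·) := by
  induction fuel generalizing l cur acc with
  | zero =>
    have : l = [] := by simpa using h
    subst this
    simp [PySem.Chars.splitOn.go, pvLines, List.modifyHead]
  | succ fuel ih =>
    match l with
    | [] => simp [PySem.Chars.splitOn.go, pvLines, List.modifyHead]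
    | c :: rest =>
      simp only [PySem.Chars.splitOn.go]
      by_cases hc : d = c
      · subst hc
        have hp : [d].isPrefixOf (d :: rest) = true := by simp [List.isPrefixOf]
        rw [if_pos hp]
        have hdrop : List.drop [d].length (d :: rest) = rest := by simp
        rw [hdrop, ih rest [] (cur.reverse :: acc) (by simpa using Nat.le_of_succ_le_succ h)]
        rcases hr : pvLines d rest with _ | ⟨x, xs⟩
        · exact absurd hr (pvLines_ne_nil d rest)
        · simp [pvLines, hr, List.modifyHead]
      · have hp : [d].isPrefixOf (c :: rest) = false := by
          simp [List.isPrefixOf]; exact fun hh => hc hh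
        rw [if_neg (by simp [hp])]
        rw [ih rest (c :: cur) acc (by simpa using Nat.le_of_succ_le_succ h)]
        rcases hr : pvLines d rest with _ | ⟨x, xs⟩
        · exact absurd hr (pvLines_ne_nil d rest)
        · simp [pvLines, hr, if_neg (fun hh : c = d => hc hh.symm), List.modifyHead]

theorem pv_splitOn_single (d : Char) (l : List Char) :
    PySem.Chars.splitOn l [d] = pvLines d l := by
  rw [PySem.Chars.splitOn, pv_go_eq d _ l [] [] (by omega)]
  rcases hr : pvLines d l with _ | ⟨x, xs⟩
  · exact absurd hr (pvLines_ne_nil d l)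
  · simp [List.modifyHead]

theorem pvJoinA_snoc (d : Char) (acc : List (List Char)) (cur : List Char) :
    pvJoinA d (acc ++ [cur]) [] = pvJoinA d acc cur ++ [d] := by
  induction acc with
  | nil => simp [pvJoinA]
  | cons x rest ih => simp [pvJoinA, ih]

theorem pvJoinA_push (d : Char) (acc : List (List Char)) (cur : List Char) (c : Char) :
    pvJoinA d acc (cur ++ [c]) = pvJoinA d acc cur ++ [c] := by
  induction acc with
  | nil => simp [pvJoinA]
  | cons x rest ih => simp [pvJoinA, ih]

theorem pvJoinA_not_mem (d e : Char) (acc : List (List Char)) (cur : List Char)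
    (hne : e ≠ d) (h1 : e ∉ cur) (h2 : ∀ s ∈ acc, e ∉ s) : e ∉ pvJoinA d acc cur := by
  induction acc with
  | nil => simpa [pvJoinA] using h1
  | cons x rest ih =>
    simp only [pvJoinA, List.mem_append, List.mem_cons, not_or]
    refine ⟨h2 x (by simp), hne, ?_⟩
    exact ih (fun s hs => h2 s (by simp [hs]))

theorem pvLines_joinA (d : Char) (acc : List (List Char)) (cur : List Char)
    (h2 : ∀ s ∈ acc, d ∉ s) (h1 : d ∉ cur) :
    pvLines d (pvJoinA d acc cur) = acc ++ [cur] := by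
  induction acc with
  | nil => simpa [pvJoinA] using pvLines_no_sep d cur h1
  | cons x rest ih =>
    have hx : d ∉ x := h2 x (by simp)
    simp only [pvJoinA]
    rw [pvLines_break d x _ hx, ih (fun s hs => h2 s (by simp [hs]))]
    simp

theorem pvStepOld_eq (acc : List (List Char)) (cur : List Char)
    (hacc : ∀ s ∈ acc, '\t' ∉ s) (hcur : '\t' ∉ cur) (tw : List (List String)) :
    pvStepOld tw (pvJoinA '\t' acc cur)
      = (if (acc.length + 1) % 3 == 0 then tw ++ [pvEmit (acc ++ [cur])] else tw) := by
  have hsep : "\t".toList = ['\t'] := by decide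
  have hparts : PySem.Chars.splitOn (pvJoinA '\t' acc cur) "\t".toList = acc ++ [cur] := by
    rw [hsep, pv_splitOn_single, pvLines_joinA '\t' acc cur hacc hcur]
  simp only [pvStepOld, hparts]
  have hlen : (acc ++ [cur]).length = acc.length + 1 := by simp
  rw [hlen]
  split
  · rw [PySem.List.slice_from_neg_ofNat (acc ++ [cur]) 3 (by norm_num)]
    simp [pvEmit]
  · rfl

theorem pvB_loop (cs : List Char) (acc : List (List Char)) (cur : List Char)
    (tw : List (List String))
    (hacc : ∀ s ∈ acc, '\t' ∉ s ∧ '\n' ∉ s) (hcur : '\t' ∉ cur ∧ '\n' ∉ cur) :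
    pvM cs acc cur tw
      = ((pvLines '\n' (pvJoinA '\t' acc cur ++ cs)).dropLast).foldl pvStepOld tw := by
  induction cs generalizing acc cur tw with
  | nil =>
    have hnl : '\n' ∉ pvJoinA '\t' acc cur :=
      pvJoinA_not_mem '\t' '\n' acc cur (by decide) hcur.2 (fun s hs => (hacc s hs).2)
    rw [List.append_nil, pvLines_no_sep '\n' _ hnl]
    simp [pvM]
  | cons c rest ih =>
    by_cases ht : c = '\t'
    · subst ht
      have h1 : pvJoinA '\t' acc cur ++ '\t' :: rest = pvJoinA '\t' (acc ++ [cur]) [] ++ rest := by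
        rw [pvJoinA_snoc]; simp
      have hacc' : ∀ s ∈ acc ++ [cur], '\t' ∉ s ∧ '\n' ∉ s := by
        intro s hs
        rcases List.mem_append.1 hs with h | h
        · exact hacc s h
        · simp at h; subst h; exact hcur
      rw [show pvM ('\t' :: rest) acc cur tw = pvM rest (acc ++ [cur]) [] tw from by
            simp [pvM],
          ih (acc ++ [cur]) [] tw hacc' (by simp), h1]
    · by_cases hn : c = '\n'
      · subst hn
        have hnl : '\n' ∉ pvJoinA '\t' acc cur :=
          pvJoinA_not_mem '\t' '\n' acc cur (by decide) hcur.2 (fun s hs => (hacc s hs).2)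
        rw [pvLines_break '\n' _ rest hnl]
        rcases hr : pvLines '\n' rest with _ | ⟨x, xs⟩
        · exact absurd hr (pvLines_ne_nil _ _)
        · rw [← hr]
          have hdl : (pvJoinA '\t' acc cur :: pvLines '\n' rest).dropLast
              = pvJoinA '\t' acc cur :: (pvLines '\n' rest).dropLast := by
            rw [hr]; exact List.dropLast_cons_of_ne_nil (by simp)
          rw [hdl]
          simp only [pvM, if_neg (by decide : ¬('\n' = '\t')), List.foldl_cons]
          rw [pvStepOld_eq acc cur (fun s hs => (hacc s hs).1) hcur.1 tw]
          have := ih [] [] (if (acc.length + 1) % 3 == 0 then tw ++ [pvEmit (acc ++ [cur])] else tw)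
            (by simp) (by simp)
          simpa [pvJoinA] using this
      · simp only [pvM, if_neg ht, if_neg hn]
        have h1 : pvJoinA '\t' acc cur ++ c :: rest = pvJoinA '\t' acc (cur ++ [c]) ++ rest := by
          rw [pvJoinA_push]; simp
        rw [h1, ih acc (cur ++ [c]) tw hacc ?_]
        constructor
        · simp only [List.mem_append, List.mem_singleton, not_or]
          exact ⟨hcur.1, fun h => ht h.symm⟩
        · simp only [List.mem_append, List.mem_singleton, not_or]
          exact ⟨hcur.2, fun h => hn h.symm⟩

theorem pvA_loop (cs : List Char) (rest : List Char) :
    ∀ (i : Nat) (acc : List (List Char)) (cur u t : List Char) (tw : List (List String)),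
    rest = cs.drop i → cur.length ≤ i →
    (cs.drop (i - cur.length)).take cur.length = cur →
    (acc.length % 3 = 1 → ∃ f, acc = f ++ [u]) →
    (acc.length % 3 = 2 → ∃ f, acc = f ++ [u, t]) →
    ((PySem.List.enumerate rest (i : Int)).foldl (pvStepA cs)
        ((i : Int) - cur.length, ((acc.length % 3 : Nat) : Int), u, t, tw)).2.2.2.2
      = pvM rest acc cur tw := by
  induction rest with
  | nil =>
    intro i acc cur u t tw _ _ _ _ _
    simp [PySem.List.enumerate_nil, pvM]
  | cons c rest' ih =>
    intro i acc cur u t tw h1 h2 h3 hu1 hu2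
    have hdrop : cs.drop i = c :: rest' := h1.symm
    have hrest : rest' = cs.drop (i + 1) := by
      rw [← List.tail_drop, hdrop]
      rfl
    have hci : cs[i]? = some c := by
      rw [← List.head?_drop, hdrop]; rfl
    have hslice : PySem.List.slice cs (some ((i : Int) - cur.length)) (some (i : Int)) = cur := by
      have hcast : ((i : Int) - cur.length) = ((i - cur.length : Nat) : Int) := by push_cast [Nat.cast_sub h2]; ring
      rw [hcast, PySem.List.slice_natCast]
      have he : i - (i - cur.length) = cur.length := by omega
      rw [he, h3]
    rw [PySem.List.enumerate_cons, List.foldl_cons]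
    have hip : ((i : Int) + 1) = (((i + 1 : Nat)) : Int) := by push_cast; ring
    by_cases hct : c = '\t'
    · subst hct
      rcases (show acc.length % 3 = 0 ∨ acc.length % 3 = 1 ∨ acc.length % 3 = 2 by omega) with hm | hm | hm
      · -- tab at count 0: store username
        have step_eq : pvStepA cs ((i : Int) - cur.length, ((acc.length % 3 : Nat) : Int), u, t, tw) ((i : Int), '\t')
            = ((((i + 1 : Nat)) : Int) - (([] : List Char).length : Int),
               (((acc ++ [cur]).length % 3 : Nat) : Int), cur, t, tw) := by
          simp [pvStepA, hm, hslice]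
          all_goals (omega)
        rw [step_eq, hip, ih (i + 1) (acc ++ [cur]) [] cur t tw hrest (by simp) (by simp)
            (fun _ => ⟨acc, rfl⟩) (fun hh => by simp at hh; omega)]
        simp [pvM]
      · -- tab at count 1: store time
        obtain ⟨f, hf⟩ := hu1 hm
        have step_eq : pvStepA cs ((i : Int) - cur.length, ((acc.length % 3 : Nat) : Int), u, t, tw) ((i : Int), '\t')
            = ((((i + 1 : Nat)) : Int) - (([] : List Char).length : Int),
               (((acc ++ [cur]).length % 3 : Nat) : Int), u, cur, tw) := by
          simp [pvStepA, hm, hslice]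
          all_goals (omega)
        rw [step_eq, hip, ih (i + 1) (acc ++ [cur]) [] u cur tw hrest (by simp) (by simp)
            (fun hh => by simp at hh; omega)
            (fun _ => ⟨f, by rw [hf]; simp⟩)]
        simp [pvM]
      · -- tab at count 2: reset
        have step_eq : pvStepA cs ((i : Int) - cur.length, ((acc.length % 3 : Nat) : Int), u, t, tw) ((i : Int), '\t')
            = ((((i + 1 : Nat)) : Int) - (([] : List Char).length : Int),
               (((acc ++ [cur]).length % 3 : Nat) : Int), u, t, tw) := by
          simp [pvStepA, hm]
          all_goals (omega)
        rw [step_eq, hip, ih (i + 1) (acc ++ [cur]) [] u t tw hrest (by simp) (by simp)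
            (fun hh => by simp at hh; omega) (fun hh => by simp at hh; omega)]
        simp [pvM]
    · by_cases hcn : c = '\n'
      · subst hcn
        rcases (show acc.length % 3 = 0 ∨ acc.length % 3 = 1 ∨ acc.length % 3 = 2 by omega) with hm | hm | hm
        · have step_eq : pvStepA cs ((i : Int) - cur.length, ((acc.length % 3 : Nat) : Int), u, t, tw) ((i : Int), '\n')
              = ((((i + 1 : Nat)) : Int) - (([] : List Char).length : Int),
                 ((([] : List (List Char)).length % 3 : Nat) : Int), u, t, tw) := by
            simp [pvStepA, hm]
          rw [step_eq, hip, ih (i + 1) [] [] u t tw hrest (by simp) (by simp)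
              (by simp) (by simp)]
          simp [pvM, show ¬(('\n' : Char) = '\t') by decide, show (acc.length + 1) % 3 ≠ 0 by omega]
        · have step_eq : pvStepA cs ((i : Int) - cur.length, ((acc.length % 3 : Nat) : Int), u, t, tw) ((i : Int), '\n')
              = ((((i + 1 : Nat)) : Int) - (([] : List Char).length : Int),
                 ((([] : List (List Char)).length % 3 : Nat) : Int), u, t, tw) := by
            simp [pvStepA, hm]
          rw [step_eq, hip, ih (i + 1) [] [] u t tw hrest (by simp) (by simp)
              (by simp) (by simp)]
          simp [pvM, show ¬(('\n' : Char) = '\t') by decide, show (acc.length + 1) % 3 ≠ 0 by omega]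
        · -- newline at count 2: emit
          obtain ⟨f, hf⟩ := hu2 hm
          have step_eq : pvStepA cs ((i : Int) - cur.length, ((acc.length % 3 : Nat) : Int), u, t, tw) ((i : Int), '\n')
              = ((((i + 1 : Nat)) : Int) - (([] : List Char).length : Int),
                 ((([] : List (List Char)).length % 3 : Nat) : Int), u, t,
                 tw ++ [[String.ofList u, String.ofList t, String.ofList cur]]) := by
            simp [pvStepA, hm, hslice]
          rw [step_eq, hip, ih (i + 1) [] [] u t (tw ++ [[String.ofList u, String.ofList t, String.ofList cur]])
              hrest (by simp) (by simp) (by simp) (by simp)]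
          have hemit : pvEmit (acc ++ [cur]) = [String.ofList u, String.ofList t, String.ofList cur] := by
            rw [hf]
            have hlen : ((f ++ [u, t]) ++ [cur]).length - 3 = f.length := by simp
            have hre : (f ++ [u, t]) ++ [cur] = f ++ [u, t, cur] := by simp
            rw [pvEmit, hlen, hre, List.drop_left]
            rfl
          simp [pvM, show ¬(('\n' : Char) = '\t') by decide, show (acc.length + 1) % 3 = 0 by omega, hemit]
      · -- ordinary character
        have hc2 : cs[i]'(by have := List.getElem?_eq_some_iff.1 hci; exact this.1) = c := by
          have := List.getElem?_eq_some_iff.1 hci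
          exact this.2
        have h3' : (cs.drop ((i + 1) - (cur ++ [c]).length)).take (cur ++ [c]).length = cur ++ [c] := by
          have he : (i + 1) - (cur ++ [c]).length = i - cur.length := by simp
          rw [he, List.length_append, List.length_singleton, List.take_add_one, h3]
          have : (cs.drop (i - cur.length))[cur.length]? = some c := by
            rw [List.getElem?_drop]
            have : i - cur.length + cur.length = i := by omega
            rw [this, hci]
          simp [this]
        have step_eq : pvStepA cs ((i : Int) - cur.length, ((acc.length % 3 : Nat) : Int), u, t, tw) ((i : Int), c)
            = ((((i + 1 : Nat)) : Int) - ((cur ++ [c]).length : Int),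
               ((acc.length % 3 : Nat) : Int), u, t, tw) := by
          rcases (show acc.length % 3 = 0 ∨ acc.length % 3 = 1 ∨ acc.length % 3 = 2 by omega) with hm | hm | hm <;>
            · simp [pvStepA, hm, hct, hcn]
        rw [step_eq, hip, ih (i + 1) acc (cur ++ [c]) u t tw hrest (by simp; omega) h3' hu1 hu2]
        simp [pvM, hct, hcn]

-- A's output is the old per-line fold over the newline-terminated lines
theorem pv_A_as_fold (corpus : String) :
    split_tweet corpus = ((pvLines '\n' corpus.toList).dropLast).foldl pvStepOld [] := by
  have hA := pvA_loop corpus.toList corpus.toList 0 [] [] [] [] [] (by simp) (by simp) (by simp)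
    (by simp) (by simp)
  have hB := pvB_loop corpus.toList [] [] [] (by simp) (by simp)
  simp only [pvJoinA, List.nil_append] at hB
  rw [split_tweet, ← hB, ← hA]
  norm_num

-- B's output is the new per-line fold over the same lines
theorem pv_B_as_fold (corpus : String) :
    split_tweet_alt corpus = ((pvLines '\n' corpus.toList).dropLast).foldl pvStepB [] := by
  rw [split_tweet_alt, show "\n".toList = ['\n'] from rfl, pv_splitOn_single,
    PySem.List.slice_to_neg_one]

-- per-line characterisations via tab count
theorem pvStepOld_count (tw : List (List String)) (line : List Char) :
    pvStepOld tw line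
      = if (line.count '\t' + 1) % 3 == 0 then tw ++ [pvEmit (pvLines '\t' line)] else tw := by
  simp only [pvStepOld, show "\t".toList = ['\t'] from rfl, pv_splitOn_single, pvLines_length]
  split
  · rw [PySem.List.slice_from_neg_ofNat (pvLines '\t' line) 3 (by norm_num)]
    simp [pvEmit]
  · rfl

theorem pvStepB_count (tw : List (List String)) (line : List Char) :
    pvStepB tw line
      = if line.count '\t' + 1 == 3 then tw ++ [(pvLines '\t' line).map String.ofList] else tw := by
  simp only [pvStepB, show "\t".toList = ['\t'] from rfl, pv_splitOn_single, pvLines_length]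

theorem pvStep_agree (tw : List (List String)) (line : List Char)
    (h : ¬(line.count '\t' % 3 = 2 ∧ line.count '\t' ≠ 2)) :
    pvStepOld tw line = pvStepB tw line := by
  rw [pvStepOld_count, pvStepB_count]
  by_cases h2 : line.count '\t' = 2
  · rw [if_pos (by simp [h2]), if_pos (by simp [h2])]
    have h3 : (pvLines '\t' line).length = 3 := by rw [pvLines_length, h2]
    rw [pvEmit, h3]
    simp
  · have hm : line.count '\t' % 3 ≠ 2 := by tauto
    rw [if_neg (by simp only [beq_iff_eq]; omega), if_neg (by simp only [beq_iff_eq]; omega)]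

-- length of the folds = countP of the emit conditions
theorem pv_len_old (lines : List (List Char)) (tw : List (List String)) :
    (lines.foldl pvStepOld tw).length
      = tw.length + lines.countP (fun l => (l.count '\t' + 1) % 3 == 0) := by
  induction lines generalizing tw with
  | nil => simp
  | cons l rest ih =>
    rw [List.foldl_cons, ih, pvStepOld_count, List.countP_cons]
    split
    · next h => simp [h]; omega
    · next h => simp at h; simp [h]

theorem pv_len_new (lines : List (List Char)) (tw : List (List String)) :
    (lines.foldl pvStepB tw).length
      = tw.length + lines.countP (fun l => l.count '\t' + 1 == 3) := by
  induction lines generalizing tw with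
  | nil => simp
  | cons l rest ih =>
    rw [List.foldl_cons, ih, pvStepB_count, List.countP_cons]
    split
    · next h => simp [h]; omega
    · next h => simp at h; simp [h]

theorem pv_countP_strict {α : Type} (p q : α → Bool) (l : List α)
    (hpq : ∀ x ∈ l, p x → q x) (x : α) (hx : x ∈ l) (hqx : q x) (hpx : ¬ p x) :
    l.countP p < l.countP q := by
  induction l with
  | nil => cases hx
  | cons a rest ih =>
    rw [List.countP_cons, List.countP_cons]
    rcases List.mem_cons.1 hx with h | h
    · subst h
      have hle : rest.countP p ≤ rest.countP q :=
        List.countP_mono_left (fun y hy => hpq y (by simp [hy]))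
      simp [hqx, hpx]
      omega
    · have hle : (if p a then 1 else 0) ≤ (if q a then 1 else 0) := by
        by_cases hpa : p a
        · simp [hpa, hpq a (by simp) hpa]
        · simp [hpa]
      have := ih (fun y hy => hpq y (by simp [hy])) h
      omega

-- ===== VERDICT (by name: the statement is the Claim_ definition above) =====
theorem split_tweet_spec : Claim_unchanged_split_tweet := by
  intro corpus _ hD
  rw [pv_A_as_fold, pv_B_as_fold]
  apply PySem.List.foldl_congr_mem
  intro acc line hline
  refine pvStep_agree acc line (fun hc => hD ?_)
  exact ⟨line, by rwa [pv_splitOn_single], hc⟩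

theorem split_tweet_changed : Claim_changed_split_tweet := by
  unfold Claim_changed_split_tweet; decide

theorem split_tweet_tight : Claim_exact_split_tweet := by
  intro corpus _ hD heq
  obtain ⟨line, hmem, hc, hne⟩ := hD
  rw [pv_splitOn_single] at hmem
  have hlen : (split_tweet corpus).length = (split_tweet_alt corpus).length := by rw [heq]
  rw [pv_A_as_fold, pv_B_as_fold, pv_len_old, pv_len_new] at hlen
  have hstrict := pv_countP_strict (fun l => l.count '\t' + 1 == 3)
      (fun l => (l.count '\t' + 1) % 3 == 0) ((pvLines '\n' corpus.toList).dropLast)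
      (fun x _ hx => by simp at hx ⊢; omega) line hmem (by simp; omega) (by simp; omega)
  omega
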